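-- pv_equiv track=rewrite | github.com/kogulko/hackerrank | strings/two-characters.py | pairs_count
-- ===== SOURCE A (Python) =====
-- def pairs_count(string, a, b):
--     res = []
--     for i in string:
--         if not res:
--             if i == a or i == b:
--                 res.append(i)
--         else:
--             if i == res[-1]:
--                 return 0
--             elif i == a or i == b:
--                 res.append(i)
--     return len(res) if len(res) > 1 else 0
-- ===== SOURCE B (Python) =====
-- def interleaved(p, q):
--     # positions in p and q strictly alternate with p leading: p0 < q0 < p1 < q1 < ...
--     if not (len(p) == len(q) or len(p) == len(q) + 1):
--         return False
--     return all(p[i] < q[i] for i in range(len(q))) and \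
--            all(q[i] < p[i + 1] for i in range(len(p) - 1))
--
--
-- def pairs_count(string, a, b):
--     pa = [i for i, c in enumerate(string) if c == a]
--     pb = [i for i, c in enumerate(string) if c == b]
--     n = len(pa) + len(pb)
--     if n < 2:
--         return 0
--     if interleaved(pa, pb) or interleaved(pb, pa):
--         return n
--     return 0
-- ===== Notes on version B (the rewrite author's own statement) =====
-- stated objective: alternative
-- what changed: A scans the string once, accumulating matched characters and returning 0 mid-loop on an adjacent repeat; B never builds the matched sequence: it collects the index lists of a-occurrences and b-occurrences and decides validity by an arithmetic interleaving test on the two sorted position lists (p0<q0<p1<q1<...), returning the summed count if either orientation interleaves.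
import Mathlib
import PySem

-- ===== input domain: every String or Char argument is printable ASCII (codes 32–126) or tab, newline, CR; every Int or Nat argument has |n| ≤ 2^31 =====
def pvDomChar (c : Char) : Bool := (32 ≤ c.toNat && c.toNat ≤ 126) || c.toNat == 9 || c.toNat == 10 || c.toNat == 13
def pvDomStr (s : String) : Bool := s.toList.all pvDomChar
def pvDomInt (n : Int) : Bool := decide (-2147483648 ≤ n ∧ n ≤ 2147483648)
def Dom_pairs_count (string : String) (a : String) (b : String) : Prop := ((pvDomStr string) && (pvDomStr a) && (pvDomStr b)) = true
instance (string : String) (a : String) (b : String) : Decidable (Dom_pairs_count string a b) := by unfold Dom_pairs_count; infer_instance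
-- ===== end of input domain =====

-- B replaces A's fused scan with early return by collecting the index lists of a/b occurrences and an arithmetic interleaving test on the two position lists; objective: alternative.


-- ===== PORT A =====
-- A's loop: mutable res, early 'return 0' when the incoming char equals res[-1].
def pairsLoopA (a : String) (b : String) : List Char → List Char → Int
  | [], res => if res.length > 1 then (res.length : Int) else 0
  | i :: rest, res =>
    if res.isEmpty then
      if ([i] == a.toList) || ([i] == b.toList) then pairsLoopA a b rest (res ++ [i])
      else pairsLoopA a b rest res
    else
      if PySem.List.pyGet? res (-1) == some i then 0
      else if ([i] == a.toList) || ([i] == b.toList) then pairsLoopA a b rest (res ++ [i])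
      else pairsLoopA a b rest res

def pairs_count (string : String) (a : String) (b : String) : Int :=
  pairsLoopA a b string.toList []

-- ===== PORT B =====
-- interleaved(p, q): p0 < q0 < p1 < q1 < …; every index used is in range, so getD is exact.
def pvInterleaved (p : List Int) (q : List Int) : Bool :=
  if !(p.length == q.length || p.length == q.length + 1) then false
  else
    ((List.range q.length).all fun i => decide (p.getD i 0 < q.getD i 0)) &&
    ((List.range (p.length - 1)).all fun i => decide (q.getD i 0 < p.getD (i + 1) 0))

def pairs_count_alt (string : String) (a : String) (b : String) : Int :=
  let pa := ((PySem.List.enumerate string.toList 0).filter fun e => [e.2] == a.toList).map (·.1)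
  let pb := ((PySem.List.enumerate string.toList 0).filter fun e => [e.2] == b.toList).map (·.1)
  let n := pa.length + pb.length
  if n < 2 then 0
  else if pvInterleaved pa pb || pvInterleaved pb pa then (n : Int)
  else 0

-- ===== PRECONDITION & SPEC =====
def Spec_pairs_count (string : String) (a : String) (b : String) (out : Int) : Prop := out = pairs_count_alt string a b
instance (string : String) (a : String) (b : String) (out : Int) : Decidable (Spec_pairs_count string a b out) := by unfold Spec_pairs_count; infer_instance

-- ===== CLAIM (what is proved, stated in full; the proofs are below) =====
def Claim_equal_pairs_count : Prop := ∀ (string : String) (a : String) (b : String), Dom_pairs_count string a b → Spec_pairs_count string a b (pairs_count string a b)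

-- ===== LEMMAS AND PROOFS =====

-- adjacent-equal test (proof-side characterisation of A's early return)
def pvHasAdj (xs : List Char) : Bool := (xs.zip xs.tail).any (fun p => p.1 == p.2)

def pvCombine (xs : List Char) : Int :=
  if pvHasAdj xs then 0 else if xs.length > 1 then (xs.length : Int) else 0

theorem pvHasAdj_nil : pvHasAdj [] = false := rfl
theorem pvHasAdj_single (x : Char) : pvHasAdj [x] = false := rfl
theorem pvHasAdj_cons2 (x y : Char) (t : List Char) :
    pvHasAdj (x :: y :: t) = ((x == y) || pvHasAdj (y :: t)) := by
  simp [pvHasAdj]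

theorem pvHasAdj_append (res : List Char) (i : Char) (t : List Char) :
    pvHasAdj (res ++ i :: t)
      = (pvHasAdj res || (res.getLast? == some i) || pvHasAdj (i :: t)) := by
  induction res with
  | nil => simp [pvHasAdj_nil]
  | cons x r ih =>
    cases r with
    | nil => simp [pvHasAdj_cons2, pvHasAdj_single]
    | cons y r' =>
      have h : (x :: y :: r') ++ i :: t = x :: (y :: (r' ++ i :: t)) := rfl
      rw [h, pvHasAdj_cons2]
      have h2 : y :: (r' ++ i :: t) = (y :: r') ++ i :: t := rfl
      rw [h2, ih, pvHasAdj_cons2, List.getLast?_cons_cons]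
      cases x == y <;> simp

theorem pairsLoopA_eq (a b : String) (l : List Char) : ∀ (res : List Char),
    pvHasAdj res = false →
    (∀ c, res.getLast? = some c → (([c] == a.toList) || ([c] == b.toList)) = true) →
    pairsLoopA a b l res
      = pvCombine (res ++ l.filter (fun c => ([c] == a.toList) || ([c] == b.toList))) := by
  induction l with
  | nil =>
    intro res h1 _
    simp [pairsLoopA, pvCombine, h1]
  | cons i rest ih =>
    intro res h1 h2
    by_cases hres : res = []
    · subst hres
      by_cases hp : (([i] == a.toList) || ([i] == b.toList)) = true
      · rw [show pairsLoopA a b (i :: rest) [] = pairsLoopA a b rest [i] by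
          simp [pairsLoopA, hp]]
        rw [ih [i] (pvHasAdj_single i) (by intro c hc; simp at hc; subst hc; exact hp)]
        simp [hp]
      · rw [show pairsLoopA a b (i :: rest) [] = pairsLoopA a b rest [] by
          simp [pairsLoopA, hp]]
        rw [ih [] pvHasAdj_nil (by intro c hc; simp at hc)]
        simp [hp]
    · have hne : res.isEmpty = false := by simpa [List.isEmpty_iff] using hres
      rw [show pairsLoopA a b (i :: rest) res
          = (if PySem.List.pyGet? res (-1) == some i then 0
             else if ([i] == a.toList) || ([i] == b.toList) then pairsLoopA a b rest (res ++ [i])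
             else pairsLoopA a b rest res) by simp [pairsLoopA, hne]]
      rw [PySem.List.pyGet?_neg_one]
      by_cases hlast : res.getLast? = some i
      · have hp : (([i] == a.toList) || ([i] == b.toList)) = true := h2 i hlast
        rw [if_pos (by simp [hlast])]
        have : (i :: rest).filter (fun c => ([c] == a.toList) || ([c] == b.toList))
            = i :: rest.filter (fun c => ([c] == a.toList) || ([c] == b.toList)) := by
          simp [hp]
        rw [this, pvCombine, pvHasAdj_append]
        simp [hlast]
      · rw [if_neg (by simp [hlast])]
        by_cases hp : (([i] == a.toList) || ([i] == b.toList)) = true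
        · rw [if_pos hp]
          have h1' : pvHasAdj (res ++ [i]) = false := by
            rw [pvHasAdj_append res i []]
            simp [h1, pvHasAdj_single, hlast]
          have h2' : ∀ c, (res ++ [i]).getLast? = some c →
              (([c] == a.toList) || ([c] == b.toList)) = true := by
            intro c hc
            simp [List.getLast?_append] at hc
            subst hc; exact hp
          rw [ih (res ++ [i]) h1' h2']
          simp [hp]
        · rw [if_neg hp, ih res h1 h2]
          simp [hp]

-- recursive characterisation of the interleaving test
def ilv : List Int → List Int → Bool
  | [], [] => true
  | [], _ :: _ => false
  | _ :: p, [] => p.isEmpty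
  | x :: p, y :: q => decide (x < y) && ilv (y :: q) p
termination_by p q => p.length + q.length
decreasing_by simp; omega

theorem all_range_succ_head (n : Nat) (f : Nat → Bool) :
    (List.range (n + 1)).all f = (f 0 && (List.range n).all fun i => f (i + 1)) := by
  simp [List.range_succ_eq_map, Function.comp_def]

theorem ilv_nil_cons (y : Int) (q : List Int) : ilv [] (y :: q) = false := by simp [ilv]
theorem ilv_cons_nil (x : Int) (p : List Int) : ilv (x :: p) [] = p.isEmpty := by simp [ilv]
theorem ilv_cons_cons (x y : Int) (p q : List Int) :
    ilv (x :: p) (y :: q) = (decide (x < y) && ilv (y :: q) p) := by simp [ilv]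

theorem pvInterleaved_eq_ilv (p q : List Int) : pvInterleaved p q = ilv p q := by
  fun_induction ilv p q with
  | case1 => decide
  | case2 y q => simp [pvInterleaved]
  | case3 x p => cases p <;> simp [pvInterleaved]
  | case4 x p y q ih =>
    rw [← ih]
    simp only [pvInterleaved, List.length_cons, all_range_succ_head,
      List.getD_cons_zero, List.getD_cons_succ, Nat.add_sub_cancel]
    by_cases hl : (p.length = q.length ∨ p.length = q.length + 1)
    · have h1 : ((p.length + 1 == q.length + 1) || (p.length + 1 == q.length + 1 + 1)) = true := by
        simp; omega
      have h2 : ((q.length + 1 == p.length) || (q.length + 1 == p.length + 1)) = true := by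
        simp; omega
      rw [h1, h2]
      simp only [Bool.not_true]
      cases hxy : decide (x < y) <;>
        cases hT : (List.range q.length).all (fun i => decide (p.getD i 0 < q.getD i 0)) <;>
        cases hC : (List.range p.length).all (fun i => decide ((y :: q).getD i 0 < p.getD i 0)) <;>
        simp
    · have h1 : ((p.length + 1 == q.length + 1) || (p.length + 1 == q.length + 1 + 1)) = false := by
        simp; omega
      have h2 : ((q.length + 1 == p.length) || (q.length + 1 == p.length + 1)) = false := by
        simp; omega
      rw [h1, h2]
      simp

def pvIds (pr : Char → Bool) (l : List (Int × Char)) : List Int :=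
  (l.filter fun e => pr e.2).map (·.1)

theorem mem_pvIds (pr : Char → Bool) (l : List (Int × Char)) (z : Int)
    (h : z ∈ pvIds pr l) : ∃ e ∈ l, e.1 = z := by
  simp only [pvIds, List.mem_map, List.mem_filter] at h
  obtain ⟨e, ⟨he, _⟩, hz⟩ := h
  exact ⟨e, he, hz⟩

-- one inductive step with the head labelled by pA
theorem ilv_step (pA pB : Char → Bool)
    (hA : ∀ c c', pA c = true → pA c' = true → c = c')
    (hdisj : ∀ c, ¬(pA c = true ∧ pB c = true))
    (e : Int × Char) (l : List (Int × Char))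
    (he : pA e.2 = true)
    (hsorted : (e :: l).Pairwise (fun u v => u.1 < v.1))
    (hmem : ∀ f ∈ l, (pA f.2 || pB f.2) = true)
    (IH : (ilv (pvIds pA l) (pvIds pB l) || ilv (pvIds pB l) (pvIds pA l))
            = !pvHasAdj (l.map (·.2))) :
    (ilv (pvIds pA (e :: l)) (pvIds pB (e :: l)) || ilv (pvIds pB (e :: l)) (pvIds pA (e :: l)))
      = !pvHasAdj ((e :: l).map (·.2)) := by
  have heB : pB e.2 = false := by
    cases h : pB e.2
    · rfl
    · exact absurd ⟨he, h⟩ (hdisj e.2)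
  have hIdsA : pvIds pA (e :: l) = e.1 :: pvIds pA l := by
    simp [pvIds, he]
  have hIdsB : pvIds pB (e :: l) = pvIds pB l := by
    simp [pvIds, heB]
  have hlt : ∀ f ∈ l, e.1 < f.1 := (List.pairwise_cons.mp hsorted).1
  rw [hIdsA, hIdsB]
  cases l with
  | nil =>
    simp [pvIds, ilv_cons_nil, ilv_nil_cons, pvHasAdj_single]
  | cons f l' =>
    have hsorted' : (f :: l').Pairwise (fun u v => u.1 < v.1) :=
      (List.pairwise_cons.mp hsorted).2
    have hlt' : ∀ g ∈ l', f.1 < g.1 := (List.pairwise_cons.mp hsorted').1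
    have hef : e.1 < f.1 := hlt f (by simp)
    by_cases hfA : pA f.2 = true
    · -- adjacent elements with the same label: both sides are false
      have hchar : e.2 = f.2 := hA _ _ he hfA
      have hfB : pB f.2 = false := by
        cases h : pB f.2
        · rfl
        · exact absurd ⟨hfA, h⟩ (hdisj f.2)
      have hIdsA' : pvIds pA (f :: l') = f.1 :: pvIds pA l' := by
        simp [pvIds, hfA]
      have hIdsB' : pvIds pB (f :: l') = pvIds pB l' := by
        simp [pvIds, hfB]
      have hR : pvHasAdj ((e :: f :: l').map (·.2)) = true := by
        simp only [List.map_cons]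
        rw [pvHasAdj_cons2]
        simp [hchar]
      rw [hR, hIdsA', hIdsB']
      have hL1 : ilv (e.1 :: f.1 :: pvIds pA l') (pvIds pB l') = false := by
        cases hB' : pvIds pB l' with
        | nil => simp [ilv_cons_nil]
        | cons z B'' =>
          have hfz : f.1 < z := by
            obtain ⟨g, hg, rfl⟩ := mem_pvIds pB l' z (by rw [hB']; simp)
            exact hlt' g hg
          rw [ilv_cons_cons, ilv_cons_cons]
          simp [not_lt.mpr (le_of_lt hfz)]
      have hL2 : ilv (pvIds pB l') (e.1 :: f.1 :: pvIds pA l') = false := by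
        cases hB' : pvIds pB l' with
        | nil => simp [ilv_nil_cons]
        | cons z B'' =>
          have hez : e.1 < z := by
            obtain ⟨g, hg, rfl⟩ := mem_pvIds pB l' z (by rw [hB']; simp)
            exact hlt g (by simp [hg])
          rw [ilv_cons_cons]
          simp [not_lt.mpr (le_of_lt hez)]
      rw [hL1, hL2]
      rfl
    · -- labels alternate at the head
      have hfA' : pA f.2 = false := by
        cases h : pA f.2
        · rfl
        · exact absurd h hfA
      have hfB : pB f.2 = true := by
        have := hmem f (by simp)
        simpa [hfA'] using this
      have hchar : (e.2 == f.2) = false := by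
        cases h : e.2 == f.2
        · rfl
        · exact absurd ⟨(beq_iff_eq.mp h) ▸ he, hfB⟩ (hdisj f.2)
      have hIdsA' : pvIds pA (f :: l') = pvIds pA l' := by
        simp [pvIds, hfA']
      have hIdsB' : pvIds pB (f :: l') = f.1 :: pvIds pB l' := by
        simp [pvIds, hfB]
      have hR : pvHasAdj ((e :: f :: l').map (·.2)) = pvHasAdj ((f :: l').map (·.2)) := by
        simp only [List.map_cons]
        rw [pvHasAdj_cons2]
        simp [hchar]
      rw [hR, ← IH, hIdsA', hIdsB']
      have h1 : ilv (e.1 :: pvIds pA l') (f.1 :: pvIds pB l')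
          = ilv (f.1 :: pvIds pB l') (pvIds pA l') := by
        rw [ilv_cons_cons]
        simp [hef]
      have h2 : ilv (f.1 :: pvIds pB l') (e.1 :: pvIds pA l') = false := by
        rw [ilv_cons_cons]
        simp [not_lt.mpr (le_of_lt hef)]
      have h3 : ilv (pvIds pA l') (f.1 :: pvIds pB l') = false := by
        cases hA'' : pvIds pA l' with
        | nil => simp [ilv_nil_cons]
        | cons z A'' =>
          have hfz : f.1 < z := by
            obtain ⟨g, hg, rfl⟩ := mem_pvIds pA l' z (by rw [hA'']; simp)
            exact hlt' g hg
          rw [ilv_cons_cons]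
          simp [not_lt.mpr (le_of_lt hfz)]
      rw [h1, h2, h3]
      simp

theorem ilv_main (pA pB : Char → Bool)
    (hA : ∀ c c', pA c = true → pA c' = true → c = c')
    (hB : ∀ c c', pB c = true → pB c' = true → c = c')
    (hdisj : ∀ c, ¬(pA c = true ∧ pB c = true)) :
    ∀ l : List (Int × Char),
      l.Pairwise (fun u v => u.1 < v.1) →
      (∀ e ∈ l, (pA e.2 || pB e.2) = true) →
      (ilv (pvIds pA l) (pvIds pB l) || ilv (pvIds pB l) (pvIds pA l))
        = !pvHasAdj (l.map (·.2)) := by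
  intro l
  induction l with
  | nil => simp [pvIds, ilv, pvHasAdj_nil]
  | cons e l ih =>
    intro hs hm
    have hIH := ih (List.pairwise_cons.mp hs).2 (fun f hf => hm f (List.mem_cons_of_mem e hf))
    by_cases he : pA e.2 = true
    · exact ilv_step pA pB hA hdisj e l he hs
        (fun f hf => hm f (List.mem_cons_of_mem e hf)) hIH
    · have heB : pB e.2 = true := by
        have := hm e (by simp)
        have heA : pA e.2 = false := by cases h : pA e.2; rfl; exact absurd h he
        simpa [heA] using this
      have hswap := ilv_step pB pA hB (fun c h => hdisj c ⟨h.2, h.1⟩) e l heB hs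
        (fun f hf => by rw [Bool.or_comm]; exact hm f (List.mem_cons_of_mem e hf))
        (by rw [Bool.or_comm]; exact hIH)
      rw [Bool.or_comm]
      exact hswap

theorem length_filter_or_of_disjoint {α : Type} (p q : α → Bool)
    (h : ∀ x, ¬(p x = true ∧ q x = true)) (l : List α) :
    (l.filter fun x => p x || q x).length = (l.filter p).length + (l.filter q).length := by
  induction l with
  | nil => simp
  | cons x t ih =>
    by_cases hp : p x = true
    · have hq : q x = false := by
        cases hqx : q x
        · rfl
        · exact absurd ⟨hp, hqx⟩ (h x)
      simp [hp, hq, ih]; omega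
    · simp at hp
      by_cases hq : q x = true
      · simp [hp, hq, ih]; omega
      · simp at hq; simp [hp, hq, ih]

theorem pvIds_cons (pr : Char → Bool) (e : Int × Char) (l : List (Int × Char)) :
    pvIds pr (e :: l) = if pr e.2 then e.1 :: pvIds pr l else pvIds pr l := by
  by_cases h : pr e.2 <;> simp [pvIds, h]

theorem map_snd_filter_enum (P : Char → Bool) (l : List Char) : ∀ k : Int,
    (((PySem.List.enumerate l k).filter fun e => P e.2).map (·.2)) = l.filter P := by
  induction l with
  | nil => intro k; simp [PySem.List.enumerate_nil]
  | cons c t ih =>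
    intro k
    rw [PySem.List.enumerate_cons, List.filter_cons, List.filter_cons]
    by_cases h : P c
    · simp only [h]
      simp [ih]
    · simp only [h]
      simp [ih]

theorem pvIds_filter (pr pA pB : Char → Bool) (himp : ∀ c, pr c = true → (pA c || pB c) = true)
    (l : List (Int × Char)) :
    pvIds pr (l.filter fun e => pA e.2 || pB e.2) = pvIds pr l := by
  induction l with
  | nil => rfl
  | cons e t ih =>
    rw [List.filter_cons]
    by_cases h : (pA e.2 || pB e.2) = true
    · simp only [h, if_pos]
      rw [pvIds_cons, pvIds_cons, ih]
    · have hpr : pr e.2 = false := by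
        cases hp : pr e.2
        · rfl
        · exact absurd (himp _ hp) (by simpa using h)
      simp only [h]
      simp only [Bool.false_eq_true, if_false]
      rw [ih, pvIds_cons, hpr]
      simp

-- ===== VERDICT (by name: the statement is the Claim_ definition above) =====
theorem pairs_count_spec : Claim_equal_pairs_count := by
  intro s a b _
  show pairs_count s a b = pairs_count_alt s a b
  have hAside : pairs_count s a b
      = pvCombine (s.toList.filter fun c => (([c] == a.toList) || ([c] == b.toList))) := by
    rw [pairs_count, pairsLoopA_eq a b s.toList [] pvHasAdj_nil (by intro c hc; simp at hc)]
    rw [List.nil_append]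
  by_cases hab : a.toList = b.toList
  · -- degenerate a == b: both sides return 0
    have hA0 : pairs_count s a b = 0 := by
      rw [hAside]
      have hpp : s.toList.filter (fun c => (([c] == a.toList) || ([c] == b.toList)))
          = s.toList.filter (fun c => [c] == a.toList) := by
        apply List.filter_congr
        intro c _
        rw [← hab]
        cases h : [c] == a.toList <;> simp
      rw [hpp]
      rcases ht : s.toList.filter (fun c => [c] == a.toList) with _ | ⟨c1, _ | ⟨c2, t2⟩⟩
      · simp [pvCombine, pvHasAdj_nil]
      · simp [pvCombine, pvHasAdj_single]
      · have h1 : ([c1] == a.toList) = true := by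
          have hm : c1 ∈ s.toList.filter (fun c => [c] == a.toList) := by rw [ht]; simp
          exact (List.mem_filter.mp hm).2
        have h2 : ([c2] == a.toList) = true := by
          have hm : c2 ∈ s.toList.filter (fun c => [c] == a.toList) := by rw [ht]; simp
          exact (List.mem_filter.mp hm).2
        have hc : c1 = c2 := by
          have e12 : ([c1] : List Char) = [c2] := (beq_iff_eq.mp h1).trans (beq_iff_eq.mp h2).symm
          simpa using e12
        simp [pvCombine, pvHasAdj_cons2, hc]
    rw [hA0]
    simp only [pairs_count_alt]
    rw [← hab]
    generalize (((PySem.List.enumerate s.toList 0).filter fun e => [e.2] == a.toList).map fun e => e.1) = L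
    cases L with
    | nil => simp
    | cons z P =>
      have hI : pvInterleaved (z :: P) (z :: P) = false := by
        rw [pvInterleaved_eq_ilv, ilv_cons_cons]
        simp
      rw [hI]
      simp only [Bool.or_self, Bool.false_eq_true, if_false]
      rw [if_neg (by simp; omega)]
  · -- a ≠ b: labels are disjoint; use the interleaving characterisation
    have hdisj : ∀ c, ¬((([c] == a.toList) = true) ∧ (([c] == b.toList) = true)) := by
      intro c ⟨h1, h2⟩
      exact hab ((beq_iff_eq.mp h1).symm.trans (beq_iff_eq.mp h2))
    have hA : ∀ c c', ([c] == a.toList) = true → ([c'] == a.toList) = true → c = c' := by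
      intro c c' h1 h2
      have e12 : ([c] : List Char) = [c'] := (beq_iff_eq.mp h1).trans (beq_iff_eq.mp h2).symm
      simpa using e12
    have hB : ∀ c c', ([c] == b.toList) = true → ([c'] == b.toList) = true → c = c' := by
      intro c c' h1 h2
      have e12 : ([c] : List Char) = [c'] := (beq_iff_eq.mp h1).trans (beq_iff_eq.mp h2).symm
      simpa using e12
    have key := ilv_main (fun c => [c] == a.toList) (fun c => [c] == b.toList) hA hB hdisj
      ((PySem.List.enumerate s.toList 0).filter fun e => (([e.2] == a.toList) || ([e.2] == b.toList)))
      ((PySem.List.pairwise_lt_enumerate s.toList 0).filter _)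
      (fun e he => (List.mem_filter.mp he).2)
    have ht_snd : (((PySem.List.enumerate s.toList 0).filter fun e => (([e.2] == a.toList) || ([e.2] == b.toList))).map (·.2))
        = s.toList.filter fun c => (([c] == a.toList) || ([c] == b.toList)) :=
      map_snd_filter_enum (fun c => (([c] == a.toList) || ([c] == b.toList))) s.toList 0
    have hpa : (((PySem.List.enumerate s.toList 0).filter fun e => [e.2] == a.toList).map fun e => e.1)
        = pvIds (fun c => [c] == a.toList)
            ((PySem.List.enumerate s.toList 0).filter fun e => (([e.2] == a.toList) || ([e.2] == b.toList))) :=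
      (pvIds_filter (fun c => [c] == a.toList) (fun c => [c] == a.toList) (fun c => [c] == b.toList)
        (fun c h => by simp [h]) (PySem.List.enumerate s.toList 0)).symm
    have hpb : (((PySem.List.enumerate s.toList 0).filter fun e => [e.2] == b.toList).map fun e => e.1)
        = pvIds (fun c => [c] == b.toList)
            ((PySem.List.enumerate s.toList 0).filter fun e => (([e.2] == a.toList) || ([e.2] == b.toList))) :=
      (pvIds_filter (fun c => [c] == b.toList) (fun c => [c] == a.toList) (fun c => [c] == b.toList)
        (fun c h => by simp [h]) (PySem.List.enumerate s.toList 0)).symm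
    have hlen : (pvIds (fun c => [c] == a.toList)
            ((PySem.List.enumerate s.toList 0).filter fun e => (([e.2] == a.toList) || ([e.2] == b.toList)))).length
        + (pvIds (fun c => [c] == b.toList)
            ((PySem.List.enumerate s.toList 0).filter fun e => (([e.2] == a.toList) || ([e.2] == b.toList)))).length
        = (s.toList.filter fun c => (([c] == a.toList) || ([c] == b.toList))).length := by
      rw [← hpa, ← hpb, ← ht_snd]
      simp only [List.length_map]
      exact (length_filter_or_of_disjoint (fun e => [e.2] == a.toList) (fun e => [e.2] == b.toList)
        (fun e => hdisj e.2) (PySem.List.enumerate s.toList 0)).symm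
    rw [hAside]
    simp only [pairs_count_alt]
    rw [hpa, hpb, hlen, pvInterleaved_eq_ilv, pvInterleaved_eq_ilv, key, ht_snd]
    by_cases h : pvHasAdj (s.toList.filter fun c => (([c] == a.toList) || ([c] == b.toList))) = true
    · rw [pvCombine, if_pos h, h]
      simp
    · have hf : pvHasAdj (s.toList.filter fun c => (([c] == a.toList) || ([c] == b.toList))) = false := by
        cases hh : pvHasAdj (s.toList.filter fun c => (([c] == a.toList) || ([c] == b.toList)))
        · rfl
        · exact absurd hh h
      rw [pvCombine, if_neg (by simp [hf]), hf]
      simp only [Bool.not_false]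
      rw [if_pos trivial]
      by_cases h2 : (s.toList.filter fun c => (([c] == a.toList) || ([c] == b.toList))).length < 2
      · rw [if_pos h2, if_neg (by omega)]
      · rw [if_neg h2, if_pos (by omega)]
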